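-- pv_equiv track=rewrite | github.com/NickStafford2/PyImportGraph | src/pyimportgraph/serialization/project_snapshot.py | _build_reciprocal_packages_by_package
-- ===== SOURCE A (Python) =====
-- def _build_reciprocal_packages_by_package(
--     reciprocal_pairs: tuple[tuple[str, str], ...],
-- ) -> dict[str, tuple[str, ...]]:
--     values: dict[str, set[str]] = {}
--
--     for source_package_name, target_package_name in reciprocal_pairs:
--         values.setdefault(source_package_name, set()).add(target_package_name)
--
--     return {
--         package_name: tuple(sorted(other_package_names))
--         for package_name, other_package_names in sorted(values.items())
--     }
-- ===== SOURCE B (Python) =====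
-- def _build_reciprocal_packages_by_package(
--     reciprocal_pairs: tuple[tuple[str, str], ...],
-- ) -> dict[str, tuple[str, ...]]:
--     sources = sorted({s for s, _ in reciprocal_pairs})
--     return {
--         s: tuple(sorted({t for src, t in reciprocal_pairs if src == s}))
--         for s in sources
--     }
-- ===== Notes on version B (the rewrite author's own statement) =====
-- stated objective: simpler
-- what changed: Replaces the dict-of-sets accumulator (setdefault/add then sort items) by a direct comprehension: sort the distinct sources once, then for each source collect its targets by a filter; no mutable dict of sets.
import Mathlib
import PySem

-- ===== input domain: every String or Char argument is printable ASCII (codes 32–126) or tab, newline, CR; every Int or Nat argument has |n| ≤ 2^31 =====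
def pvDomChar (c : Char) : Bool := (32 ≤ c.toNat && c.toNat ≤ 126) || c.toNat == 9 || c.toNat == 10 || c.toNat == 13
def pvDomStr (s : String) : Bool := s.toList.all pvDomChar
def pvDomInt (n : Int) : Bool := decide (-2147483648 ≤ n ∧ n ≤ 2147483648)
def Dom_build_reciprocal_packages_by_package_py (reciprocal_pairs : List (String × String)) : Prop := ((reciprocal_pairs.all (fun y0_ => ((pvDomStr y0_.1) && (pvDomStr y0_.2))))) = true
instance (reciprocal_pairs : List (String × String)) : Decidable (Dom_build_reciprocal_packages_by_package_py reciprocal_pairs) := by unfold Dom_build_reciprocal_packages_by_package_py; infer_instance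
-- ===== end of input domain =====

-- B replaces A's dict-of-sets accumulator by a single comprehension over the sorted distinct
-- sources with a per-source filter (objective: simpler).

-- ===== PORT A =====
-- 'values.setdefault(k, set()).add(t)' mutates the set stored at k in place:
-- exactly d[k] = d.get(k, set()).add(t), i.e. PySem.Dict.modify with default the empty set.
-- 'sorted(values.items())' compares (str, set) tuples; dict keys are unique, so the comparison
-- only ever reads the first component: ported as a sort keyed on the key.
def build_reciprocal_packages_by_package_py (reciprocal_pairs : List (String × String)) : List (String × List String) :=
  let values : PySem.Dict String (PySem.Set String) :=
    reciprocal_pairs.foldl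
      (fun d p => d.modify p.1 PySem.Set.empty (fun s => PySem.Set.add s p.2))
      PySem.Dict.empty
  (PySem.List.sorted values.items (fun p => p.1) false).map
    (fun p => (p.1, PySem.List.sorted p.2 (fun x => x) false))

-- ===== PORT B =====
def build_reciprocal_packages_by_package_py_alt (reciprocal_pairs : List (String × String)) : List (String × List String) :=
  let sources := PySem.List.sorted (PySem.Set.ofList (reciprocal_pairs.map Prod.fst)) (fun x => x) false
  sources.map (fun s =>
    (s, PySem.List.sorted
          (PySem.Set.ofList ((reciprocal_pairs.filter (fun p => p.1 == s)).map Prod.snd))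
          (fun x => x) false))

-- ===== PRECONDITION & SPEC =====
def Spec_build_reciprocal_packages_by_package_py (reciprocal_pairs : List (String × String)) (out : List (String × List String)) : Prop := out = build_reciprocal_packages_by_package_py_alt reciprocal_pairs
instance (reciprocal_pairs : List (String × String)) (out : List (String × List String)) : Decidable (Spec_build_reciprocal_packages_by_package_py reciprocal_pairs out) := by unfold Spec_build_reciprocal_packages_by_package_py; infer_instance

-- ===== CLAIM (what is proved, stated in full; the proofs are below) =====
def Claim_equal_build_reciprocal_packages_by_package_py : Prop := ∀ (reciprocal_pairs : List (String × String)), Dom_build_reciprocal_packages_by_package_py reciprocal_pairs → Spec_build_reciprocal_packages_by_package_py reciprocal_pairs (build_reciprocal_packages_by_package_py reciprocal_pairs)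

-- ===== LEMMAS AND PROOFS =====

-- The set accumulated at key c by A's loop is the set of targets of the pairs with source c.
lemma getD_foldl_modify_set_add (l : List (String × String)) (d : PySem.Dict String (PySem.Set String)) (c : String) :
    (l.foldl (fun d p => d.modify p.1 PySem.Set.empty (fun s => PySem.Set.add s p.2)) d).getD c PySem.Set.empty
      = PySem.Set.update (d.getD c PySem.Set.empty) ((l.filter (fun p => p.1 == c)).map (·.2)) := by
  induction l generalizing d with
  | nil => simp [PySem.Set.update]
  | cons p t ih =>
      simp only [List.foldl_cons, ih, List.filter_cons]
      rw [PySem.Dict.getD_modify]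
      by_cases h : c = p.1
      · simp [h, PySem.Set.update]
      · have h' : (p.1 == c) = false := by simp [Ne.symm h]
        simp [h, h']

theorem build_reciprocal_packages_by_package_py_spec_aux (ps : List (String × String)) :
    build_reciprocal_packages_by_package_py ps = build_reciprocal_packages_by_package_py_alt ps := by
  unfold build_reciprocal_packages_by_package_py build_reciprocal_packages_by_package_py_alt
  set F : String → PySem.Set String :=
    fun s => PySem.Set.ofList ((ps.filter (fun p => p.1 == s)).map Prod.snd) with hF
  set values : PySem.Dict String (PySem.Set String) :=
    ps.foldl (fun d p => d.modify p.1 PySem.Set.empty (fun s => PySem.Set.add s p.2))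
      PySem.Dict.empty with hv
  have hnodup : values.keys.Nodup := by
    rw [hv]
    exact PySem.Dict.nodup_keys_foldl_modify_key ps Prod.fst _ _ _ PySem.Dict.nodup_keys_empty
  have hkeys : values.keys = PySem.Set.ofList (ps.map Prod.fst) := by
    rw [hv, PySem.Dict.keys_foldl_modify_key]
    simp [PySem.Set.update, PySem.Set.ofList_eq_foldl]
  have hgetD : ∀ c, values.getD c PySem.Set.empty = F c := by
    intro c
    rw [hv, getD_foldl_modify_set_add]
    simp [hF, PySem.Set.update, PySem.Set.ofList_eq_foldl, PySem.Dict.getD_empty]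
  have hitems : values.items = values.keys.map (fun k => (k, F k)) := by
    rw [PySem.Dict.items_eq_map_keys values hnodup PySem.Set.empty]
    exact List.map_congr_left (fun k _ => by rw [hgetD])
  -- name the sorted order of the items: map F over the sorted distinct sources
  have hsorted :
      PySem.List.sorted values.items (fun p => p.1) false
        = (PySem.List.sorted (PySem.Set.ofList (ps.map Prod.fst)) (fun x => x) false).map
            (fun k => (k, F k)) := by
    apply PySem.List.sorted_eq_of_perm_of_pairwise_lt
    · rw [hitems, hkeys]
      exact (PySem.List.sorted_perm _ _ _).map _
    · exact (PySem.List.sorted_ofList_pairwise_lt (ps.map Prod.fst)).map _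
        (fun {a b} h => by simpa using h)
  simp only [hsorted, List.map_map]
  rfl

-- ===== VERDICT (by name: the statement is the Claim_ definition above) =====
theorem build_reciprocal_packages_by_package_py_spec : Claim_equal_build_reciprocal_packages_by_package_py := by
  intro ps _
  exact build_reciprocal_packages_by_package_py_spec_aux ps
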